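-- pv_equiv track=rewrite | github.com/SergeyTo95/deepalpha-bot | services/news_service.py | classify_source_quality
-- ===== SOURCE A (Python) =====
-- _TIER1_DOMAINS = {
--     "reuters.com", "apnews.com", "bloomberg.com", "ft.com", "wsj.com",
--     "bbc.com", "bbc.co.uk", "cnbc.com", "sec.gov", "federalreserve.gov",
--     "whitehouse.gov", "congress.gov", "un.org", "nato.int", "europa.eu",
--     "espn.com", "theathletic.com", "coindesk.com", "theblock.co",
--     "nytimes.com", "washingtonpost.com", "economist.com",
-- }
--
-- _TIER1_KEYWORDS = {
--     "reuters", "associated press", "ap news", "bloomberg", "financial times",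
--     "wall street journal", "bbc", "cnbc", "sec.gov", "federal reserve",
--     "white house", "coindesk", "the block", "espn", "the athletic",
-- }
--
-- _TIER2_DOMAINS = {
--     "politico.com", "axios.com", "theguardian.com", "skysports.com",
--     "aljazeera.com", "cointelegraph.com", "decrypt.co", "forbes.com",
--     "businessinsider.com", "techcrunch.com", "theverge.com", "wired.com",
-- }
--
-- _TIER2_KEYWORDS = {
--     "politico", "axios", "the guardian", "sky sports", "al jazeera",
--     "cointelegraph", "decrypt", "forbes", "business insider",
-- }
--
-- _TIER3_KEYWORDS = {
--     "twitter", "x.com", "nitter", "reddit", "medium", "substack",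
--     "telegram", "youtube", "tiktok",
-- }
--
-- def classify_source_quality(source: str, link: str = "") -> str:
--     s = (source or "").lower()
--     l = (link or "").lower()
--     combined = s + " " + l
--     for domain in _TIER1_DOMAINS:
--         if domain in combined:
--             return "tier1"
--     for kw in _TIER1_KEYWORDS:
--         if kw in combined:
--             return "tier1"
--     for domain in _TIER2_DOMAINS:
--         if domain in combined:
--             return "tier2"
--     for kw in _TIER2_KEYWORDS:
--         if kw in combined:
--             return "tier2"
--     for kw in _TIER3_KEYWORDS:
--         if kw in combined:
--             return "tier3"
--     return "unknown"
-- ===== SOURCE B (Python) =====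
-- _TIER1_DOMAINS = {
--     "reuters.com", "apnews.com", "bloomberg.com", "ft.com", "wsj.com",
--     "bbc.com", "bbc.co.uk", "cnbc.com", "sec.gov", "federalreserve.gov",
--     "whitehouse.gov", "congress.gov", "un.org", "nato.int", "europa.eu",
--     "espn.com", "theathletic.com", "coindesk.com", "theblock.co",
--     "nytimes.com", "washingtonpost.com", "economist.com",
-- }
--
-- _TIER1_KEYWORDS = {
--     "reuters", "associated press", "ap news", "bloomberg", "financial times",
--     "wall street journal", "bbc", "cnbc", "sec.gov", "federal reserve",
--     "white house", "coindesk", "the block", "espn", "the athletic",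
-- }
--
-- _TIER2_DOMAINS = {
--     "politico.com", "axios.com", "theguardian.com", "skysports.com",
--     "aljazeera.com", "cointelegraph.com", "decrypt.co", "forbes.com",
--     "businessinsider.com", "techcrunch.com", "theverge.com", "wired.com",
-- }
--
-- _TIER2_KEYWORDS = {
--     "politico", "axios", "the guardian", "sky sports", "al jazeera",
--     "cointelegraph", "decrypt", "forbes", "business insider",
-- }
--
-- _TIER3_KEYWORDS = {
--     "twitter", "x.com", "nitter", "reddit", "medium", "substack",
--     "telegram", "youtube", "tiktok",
-- }
--
-- # A single rank index over every term, built once: 1 for tier1, 2 for tier2, 3 for tier3.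
-- _RANKED_TERMS = (
--     [(t, 1) for t in _TIER1_DOMAINS] + [(t, 1) for t in _TIER1_KEYWORDS]
--     + [(t, 2) for t in _TIER2_DOMAINS] + [(t, 2) for t in _TIER2_KEYWORDS]
--     + [(t, 3) for t in _TIER3_KEYWORDS]
-- )
--
--
-- def classify_source_quality(source: str, link: str = "") -> str:
--     s = (source or "").lower()
--     l = (link or "").lower()
--     combined = s + " " + l
--     best = 4
--     for term, rank in _RANKED_TERMS:
--         if term in combined and rank < best:
--             best = rank
--     return {1: "tier1", 2: "tier2", 3: "tier3"}.get(best, "unknown")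
-- ===== Notes on version B (the rewrite author's own statement) =====
-- stated objective: alternative
-- what changed: The priority-ordered early-exit loops over five tier sets are replaced by one running-minimum pass over a prebuilt (term, rank) index, mapping the minimum rank found to its tier name at the end.
import Mathlib
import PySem

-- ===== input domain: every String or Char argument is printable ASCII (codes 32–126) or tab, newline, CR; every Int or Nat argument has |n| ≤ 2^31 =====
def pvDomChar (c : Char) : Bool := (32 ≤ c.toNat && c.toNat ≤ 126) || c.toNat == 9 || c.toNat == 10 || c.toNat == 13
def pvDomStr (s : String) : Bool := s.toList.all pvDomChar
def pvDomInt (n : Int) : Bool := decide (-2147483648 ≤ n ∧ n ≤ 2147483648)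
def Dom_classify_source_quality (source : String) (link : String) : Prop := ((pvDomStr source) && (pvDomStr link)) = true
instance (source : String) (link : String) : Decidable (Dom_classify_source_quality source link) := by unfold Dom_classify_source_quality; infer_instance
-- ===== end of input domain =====

-- B replaces A's five priority-ordered early-exit loops by one running-minimum pass
-- over a prebuilt (term, rank) index; same return value everywhere (objective: alternative).

-- ===== PORT A =====
-- the tier sets (Python sets of distinct strings; iteration order irrelevant to the result)
def pvTier1Domains : List String :=
  ["reuters.com", "apnews.com", "bloomberg.com", "ft.com", "wsj.com",
   "bbc.com", "bbc.co.uk", "cnbc.com", "sec.gov", "federalreserve.gov",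
   "whitehouse.gov", "congress.gov", "un.org", "nato.int", "europa.eu",
   "espn.com", "theathletic.com", "coindesk.com", "theblock.co",
   "nytimes.com", "washingtonpost.com", "economist.com"]
def pvTier1Keywords : List String :=
  ["reuters", "associated press", "ap news", "bloomberg", "financial times",
   "wall street journal", "bbc", "cnbc", "sec.gov", "federal reserve",
   "white house", "coindesk", "the block", "espn", "the athletic"]
def pvTier2Domains : List String :=
  ["politico.com", "axios.com", "theguardian.com", "skysports.com",
   "aljazeera.com", "cointelegraph.com", "decrypt.co", "forbes.com",
   "businessinsider.com", "techcrunch.com", "theverge.com", "wired.com"]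
def pvTier2Keywords : List String :=
  ["politico", "axios", "the guardian", "sky sports", "al jazeera",
   "cointelegraph", "decrypt", "forbes", "business insider"]
def pvTier3Keywords : List String :=
  ["twitter", "x.com", "nitter", "reddit", "medium", "substack",
   "telegram", "youtube", "tiktok"]

def classify_source_quality (source : String) (link : String) : String :=
  let s := PySem.Str.lower source
  let l := PySem.Str.lower link
  let combined := s ++ " " ++ l
  if pvTier1Domains.any (fun d => PySem.Str.isIn d combined) then "tier1"
  else if pvTier1Keywords.any (fun kw => PySem.Str.isIn kw combined) then "tier1"
  else if pvTier2Domains.any (fun d => PySem.Str.isIn d combined) then "tier2"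
  else if pvTier2Keywords.any (fun kw => PySem.Str.isIn kw combined) then "tier2"
  else if pvTier3Keywords.any (fun kw => PySem.Str.isIn kw combined) then "tier3"
  else "unknown"

-- ===== PORT B =====
-- the single (term, rank) index built once from the tier sets, as in Source B
def pvRankedTerms : List (String × Int) :=
  pvTier1Domains.map (fun t => (t, 1)) ++ pvTier1Keywords.map (fun t => (t, 1))
  ++ pvTier2Domains.map (fun t => (t, 2)) ++ pvTier2Keywords.map (fun t => (t, 2))
  ++ pvTier3Keywords.map (fun t => (t, 3))

def classify_source_quality_alt (source : String) (link : String) : String :=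
  let s := PySem.Str.lower source
  let l := PySem.Str.lower link
  let combined := s ++ " " ++ l
  let best : Int := pvRankedTerms.foldl
    (fun best p => if PySem.Str.isIn p.1 combined && p.2 < best then p.2 else best) 4
  (PySem.Dict.ofList [((1 : Int), "tier1"), (2, "tier2"), (3, "tier3")]).getD best "unknown"

-- ===== PRECONDITION & SPEC =====
def Spec_classify_source_quality (source : String) (link : String) (out : String) : Prop := out = classify_source_quality_alt source link
instance (source : String) (link : String) (out : String) : Decidable (Spec_classify_source_quality source link out) := by unfold Spec_classify_source_quality; infer_instance

-- ===== CLAIM (what is proved, stated in full; the proofs are below) =====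
def Claim_equal_classify_source_quality : Prop := ∀ (source : String) (link : String), Dom_classify_source_quality source link → Spec_classify_source_quality source link (classify_source_quality source link)

-- ===== LEMMAS AND PROOFS =====

-- one constant-rank segment of B's fold: it lowers best to r exactly when some term matches and r < best
theorem pvFold_const_rank {α : Type} (q : α → Bool) (ts : List α) (r : Int) :
    ∀ best : Int, (ts.map (fun t => (t, r))).foldl
        (fun best p => if q p.1 && p.2 < best then p.2 else best) best
      = if ts.any q && r < best then r else best := by
  induction ts with
  | nil => intro best; simp
  | cons t ts ih =>
    intro best
    simp only [List.map_cons, List.foldl_cons, List.any_cons]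
    rw [ih]
    by_cases hq : q t = true
    · by_cases hr : r < best
      · simp [hq, hr]
      · simp [hq, hr]
    · simp only [Bool.not_eq_true] at hq
      simp [hq]

theorem classify_source_quality_eq_alt (source link : String) :
    classify_source_quality source link = classify_source_quality_alt source link := by
  simp only [classify_source_quality, classify_source_quality_alt, pvRankedTerms,
    List.foldl_append]
  set c := PySem.Str.lower source ++ " " ++ PySem.Str.lower link with hc
  rw [pvFold_const_rank (fun t => PySem.Str.isIn t c), pvFold_const_rank (fun t => PySem.Str.isIn t c),
    pvFold_const_rank (fun t => PySem.Str.isIn t c), pvFold_const_rank (fun t => PySem.Str.isIn t c),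
    pvFold_const_rank (fun t => PySem.Str.isIn t c)]
  generalize (pvTier1Domains.any (fun t => PySem.Str.isIn t c)) = a1
  generalize (pvTier1Keywords.any (fun t => PySem.Str.isIn t c)) = a2
  generalize (pvTier2Domains.any (fun t => PySem.Str.isIn t c)) = a3
  generalize (pvTier2Keywords.any (fun t => PySem.Str.isIn t c)) = a4
  generalize (pvTier3Keywords.any (fun t => PySem.Str.isIn t c)) = a5
  revert a1 a2 a3 a4 a5
  decide

-- ===== VERDICT (by name: the statement is the Claim_ definition above) =====
theorem classify_source_quality_spec : Claim_equal_classify_source_quality := by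
  intro source link _
  exact classify_source_quality_eq_alt source link
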